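/- GENERATED by c/gen_decode.py: decode facts of the image, one per distinct instruction byte string. -/
import UserX.DecodeImage

#decode_all Gif.Dec
  "08d0"  -- or al,dl
  "0f8425010000"  -- je 10b027
  "0f847b040000"  -- je 107071
  "0f84ac000000"  -- je 10a8ed
  "0f84ec010000"  -- je 10a9c0
  "0f85fafeffff"  -- jne 109503
  "0f8f69ffffff"  -- jg 106f75
  "0f94c2"  -- sete dl
  "0fb60b"  -- movzx ecx,BYTE PTR [rbx]
  "0fb6442431"  -- movzx eax,BYTE PTR [rsp+0x31]
  "0fb7ac2d80131400"  -- movzx ebp,WORD PTR [rbp+rbp*1+0x141380]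
  "39f8"  -- cmp eax,edi
  "400fb6c6"  -- movzx eax,sil
  "410fb67508"  -- movzx esi,BYTE PTR [r13+0x8]
  "41813f02100000"  -- cmp DWORD PTR [r15],0x1002
  "4183e470"  -- and r12d,0x70
  "41884701"  -- mov BYTE PTR [r15+0x1],al
  "41895e28"  -- mov DWORD PTR [r14+0x28],ebx
  "4189d5"  -- mov r13d,edx
  "418b4608"  -- mov eax,DWORD PTR [r14+0x8]
  "418b5e28"  -- mov ebx,DWORD PTR [r14+0x28]
  "41bc00000000"  -- mov r12d,0x0
  "41c1fe06"  -- sar r14d,0x6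
  "41c7450000000000"  -- mov DWORD PTR [r13+0x0],0x0
  "41c7456066000000"  -- mov DWORD PTR [r13+0x60],0x66
  "41c784240800c00000000000"  -- mov DWORD PTR [r12+0xc00008],0x0
  "41c7860800c00000f3f3f3"  -- mov DWORD PTR [r14+0xc00008],0xf3f3f300
  "440fb6742430"  -- movzx r14d,BYTE PTR [rsp+0x30]
  "4439e0"  -- cmp eax,r12d
  "44896308"  -- mov DWORD PTR [rbx+0x8],r12d
  "44897b0c"  -- mov DWORD PTR [rbx+0xc],r15d
  "4489eb"  -- mov ebx,r13d
  "4489fd"  -- mov ebp,r15d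
  "448b730c"  -- mov r14d,DWORD PTR [rbx+0xc]
  "448d6001"  -- lea r12d,[rax+0x1]
  "4539e6"  -- cmp r14d,r12d
  "458827"  -- mov BYTE PTR [r15],r12b
  "45887e58"  -- mov BYTE PTR [r14+0x58],r15b
  "4589ee"  -- mov r14d,r13d
  "4801dd"  -- add rbp,rbx
  "4831f8"  -- xor rax,rdi
  "4863c3"  -- movsxd rax,ebx
  "4881c488000000"  -- add rsp,0x88
  "4883c338"  -- add rbx,0x38
  "4883ec28"  -- sub rsp,0x28
  "48890424"  -- mov QWORD PTR [rsp],rax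
  "48896c2448"  -- mov QWORD PTR [rsp+0x48],rbp
  "4889d9"  -- mov rcx,rbx
  "488b4330"  -- mov rax,QWORD PTR [rbx+0x30]
  "488b5d48"  -- mov rbx,QWORD PTR [rbp+0x48]
  "488b7318"  -- mov rsi,QWORD PTR [rbx+0x18]
  "488b7b40"  -- mov rdi,QWORD PTR [rbx+0x40]
  "488d1c40"  -- lea rbx,[rax+rax*2]
  "488d542420"  -- lea rdx,[rsp+0x20]
  "488d7301"  -- lea rsi,[rbx+0x1]
  "488d742430"  -- lea rsi,[rsp+0x30]
  "488d7b08"  -- lea rdi,[rbx+0x8]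
  "488d7b28"  -- lea rdi,[rbx+0x28]
  "488d7b60"  -- lea rdi,[rbx+0x60]
  "488d7d20"  -- lea rdi,[rbp+0x20]
  "488d7f10"  -- lea rdi,[rdi+0x10]
  "4898"  -- cdqe
  "48c7431800000000"  -- mov QWORD PTR [rbx+0x18],0x0
  "48c744240820191400"  -- mov QWORD PTR [rsp+0x8],0x141920
  "48c7442408e0151400"  -- mov QWORD PTR [rsp+0x8],0x1415e0
  "48c7442410809a1000"  -- mov QWORD PTR [rsp+0x10],0x109a80
  "48c7442418c0171400"  -- mov QWORD PTR [rsp+0x18],0x1417c0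
  "48c7452000000000"  -- mov QWORD PTR [rbp+0x20],0x0
  "48f7e1"  -- mul rcx
  "49634614"  -- movsxd rax,DWORD PTR [r14+0x14]
  "4963ef"  -- movsxd rbp,r15d
  "49894638"  -- mov QWORD PTR [r14+0x38],rax
  "4989e5"  -- mov r13,rsp
  "498b5d70"  -- mov rbx,QWORD PTR [r13+0x70]
  "498d4658"  -- lea rax,[r14+0x58]
  "498d7c2414"  -- lea rdi,[r12+0x14]
  "498d7c2440"  -- lea rdi,[r12+0x40]
  "498d7d40"  -- lea rdi,[r13+0x40]
  "498d7e20"  -- lea rdi,[r14+0x20]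
  "49c1ec03"  -- shr r12,0x3
  "49c7860000c00000000000"  -- mov QWORD PTR [r14+0xc00000],0x0
  "4c09e5"  -- or rbp,r12
  "4c896518"  -- mov QWORD PTR [rbp+0x18],r12
  "4c897c2448"  -- mov QWORD PTR [rsp+0x48],r15
  "4c89ff"  -- mov rdi,r15
  "4c8b6b40"  -- mov r13,QWORD PTR [rbx+0x40]
  "4c8b742440"  -- mov r14,QWORD PTR [rsp+0x40]
  "4c8d2440"  -- lea r12,[rax+rax*2]
  "4c8d7c01fe"  -- lea r15,[rcx+rax*1-0x2]
  "4d896c2420"  -- mov QWORD PTR [r12+0x20],r13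
  "4d8d7c8500"  -- lea r15,[r13+rax*4+0x0]
  "7405"  -- je 10a4b1
  "7420"  -- je 107aa5
  "743a"  -- je 10799a
  "7456"  -- je 1054e6
  "7487"  -- je 107f07
  "74e8"  -- je 108123
  "751d"  -- jne 1094a7
  "757e"  -- jne 1079a7
  "785c"  -- js 108211
  "7e3a"  -- jle 105cdc
  "7f23"  -- jg 1051aa
  "817c241402100000"  -- cmp DWORD PTR [rsp+0x14],0x1002
  "83c108"  -- add ecx,0x8
  "83e802"  -- sub eax,0x2
  "85db"  -- test ebx,ebx
  "89432c"  -- mov DWORD PTR [rbx+0x2c],eax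
  "896b04"  -- mov DWORD PTR [rbx+0x4],ebp
  "89c6"  -- mov esi,eax
  "89de"  -- mov esi,ebx
  "8b4314"  -- mov eax,DWORD PTR [rbx+0x14]
  "8b44242c"  -- mov eax,DWORD PTR [rsp+0x2c]
  "8b6b18"  -- mov ebp,DWORD PTR [rbx+0x18]
  "8b742470"  -- mov esi,DWORD PTR [rsp+0x70]
  "b802100000"  -- mov eax,0x1002
  "ba38000000"  -- mov edx,0x38
  "be605c1000"  -- mov esi,0x105c60
  "c1e008"  -- shl eax,0x8
  "c70301000000"  -- mov DWORD PTR [rbx],0x1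
  "c7431800000000"  -- mov DWORD PTR [rbx+0x18],0x0
  "c7436070000000"  -- mov DWORD PTR [rbx+0x60],0x70
  "c7450400000000"  -- mov DWORD PTR [rbp+0x4],0x0
  "c7800000c000f1f1f1f1"  -- mov DWORD PTR [rax+0xc00000],0xf1f1f1f1
  "c7850400c00001f3f3f3"  -- mov DWORD PTR [rbp+0xc00004],0xf3f3f301
  "e801a5ffff"  -- call 100720
  "e805feffff"  -- call 1052e0
  "e80b6cffff"  -- call 1008e0
  "e80e71ffff"  -- call 100720
  "e811aeffff"  -- call 100640
  "e81658ffff"  -- call 100720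
  "e81aa4ffff"  -- call 100720
  "e8219dffff"  -- call 100300
  "e82596ffff"  -- call 100640
  "e82879ffff"  -- call 1008e0
  "e82c58ffff"  -- call 100720
  "e8305dffff"  -- call 100720
  "e831d0ffff"  -- call 105f20
  "e83373ffff"  -- call 1008e0
  "e836feffff"  -- call 1052e0
  "e83d8dffff"  -- call 1008e0
  "e8425effff"  -- call 100640
  "e844d2ffff"  -- call 107760
  "e84685ffff"  -- call 100720
  "e84976ffff"  -- call 100720
  "e84f5bffff"  -- call 100300
  "e85381ffff"  -- call 1008e0
  "e857d1ffff"  -- call 106020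
  "e85dadffff"  -- call 100640
  "e8627affff"  -- call 100640
  "e8679affff"  -- call 103800
  "e86a73ffff"  -- call 1008e0
  "e86dadffff"  -- call 100640
  "e872b7ffff"  -- call 101440
  "e877a4ffff"  -- call 100720
  "e87c63ffff"  -- call 1003c0
  "e88371ffff"  -- call 100720
  "e8898fffff"  -- call 1008e0
  "e88b63ffff"  -- call 1008e0
  "e88ed5ffff"  -- call 107a80
  "e898afffff"  -- call 103800
  "e89aafffff"  -- call 100640
  "e8a37fffff"  -- call 100720
  "e8a69affff"  -- call 100640
  "e8acacffff"  -- call 100640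
  "e8ae79ffff"  -- call 100800
  "e8b0f9ffff"  -- call 1052e0
  "e8b594ffff"  -- call 1003c0
  "e8b87affff"  -- call 100720
  "e8bb6affff"  -- call 1003c0
  "e8bf58ffff"  -- call 1008e0
  "e8c4beffff"  -- call 105f20
  "e8c868ffff"  -- call 1008e0
  "e8cac3ffff"  -- call 101440
  "e8d0eaffff"  -- call 107a80
  "e8d695ffff"  -- call 1003c0
  "e8da56ffff"  -- call 100640
  "e8df81ffff"  -- call 1008e0
  "e8e270ffff"  -- call 100640
  "e8e758ffff"  -- call 100720
  "e8ebe1ffff"  -- call 107ee0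
  "e8f07affff"  -- call 100720
  "e8f578ffff"  -- call 1008e0
  "e8faceffff"  -- call 105f20
  "e906ffffff"  -- jmp 10a8ed
  "e93a040000"  -- jmp 10709d
  "e955fdffff"  -- jmp 108e78
  "e97affffff"  -- jmp 108816
  "e9a4000000"  -- jmp 106e4b
  "e9cdfdffff"  -- jmp 1080f7
  "eb29"  -- jmp 107c4d
  "eb6d"  -- jmp 105553
  "ebaa"  -- jmp 10a96a
  "ebc2"  -- jmp 10a531
  "ebd9"  -- jmp 105cb5
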